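-- pv_equiv track=rewrite | github.com/open-thought/arc-agi-2 | arc-1/rejection_baseline/utils.py | rfind_token_index
-- ===== SOURCE A (Python) =====
-- def rfind_token_index(tokens: list[str], sub: str) -> int:
--     combined = "".join(tokens)
--     found_index = combined.rfind(sub)
--     if found_index < 0:
--         return -1
--     l = 0
--     i = 0
--     while l < found_index:
--         l += len(tokens[i])
--         i += 1
--     return i
-- ===== SOURCE B (Python) =====
-- def rfind_token_index(tokens: list[str], sub: str) -> int:
--     combined = "".join(tokens)
--     found_index = combined.rfind(sub)
--     if found_index < 0:
--         return -1
--     # cumulative start-offset table, then a binary search (bisect_left) in it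
--     prefix = [0]
--     for t in tokens:
--         prefix.append(prefix[-1] + len(t))
--     lo, hi = 0, len(prefix)
--     while lo < hi:
--         mid = (lo + hi) // 2
--         if prefix[mid] < found_index:
--             lo = mid + 1
--         else:
--             hi = mid
--     return lo
-- ===== Notes on version B (the rewrite author's own statement) =====
-- stated objective: alternative
-- what changed: The incremental offset walk over tokens is replaced by building a cumulative start-offset table once and locating the token index with a hand-written bisect_left binary search over it.
import Mathlib
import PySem

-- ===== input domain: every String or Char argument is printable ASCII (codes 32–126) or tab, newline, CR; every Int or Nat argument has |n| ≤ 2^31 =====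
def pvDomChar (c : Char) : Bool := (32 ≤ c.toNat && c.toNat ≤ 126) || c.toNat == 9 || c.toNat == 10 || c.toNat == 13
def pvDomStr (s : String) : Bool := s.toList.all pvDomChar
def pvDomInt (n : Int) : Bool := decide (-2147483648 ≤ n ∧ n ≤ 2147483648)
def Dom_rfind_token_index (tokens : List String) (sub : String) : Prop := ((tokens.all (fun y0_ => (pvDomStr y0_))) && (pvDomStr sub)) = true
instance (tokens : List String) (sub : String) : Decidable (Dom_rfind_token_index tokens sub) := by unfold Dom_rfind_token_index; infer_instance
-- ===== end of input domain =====

-- B replaces A's linear offset walk by a cumulative start-offset table queried with binary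
-- search (bisect_left); same return value everywhere, alternative decomposition.

-- ===== PORT A =====
-- shared by both ports: combined = "".join(tokens), as a list of chars (exact on any input)
def pvJoin (tokens : List String) : List Char := (tokens.map String.toList).flatten

-- str.rfind(sub): does sub occur at position j of c?
def pvMatchAt (c s : List Char) (j : Nat) : Bool := ((c.drop j).take s.length) == s

-- scan candidate positions j, j-1, …, 0; first (i.e. rightmost) match wins, else -1
def pvRfindGo (c s : List Char) : Nat → Int
  | 0 => if pvMatchAt c s 0 then 0 else -1
  | j+1 => if pvMatchAt c s (j+1) then ((j : Int) + 1) else pvRfindGo c s j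

-- combined.rfind(sub) (start at the largest candidate position len(c)-len(s))
def pvRfind (c s : List Char) : Int := pvRfindGo c s (c.length - s.length)

-- the while-loop of A: while l < found: l += len(tokens[i]); i += 1
-- (structural recursion over the token list; the empty case with l < found is
-- unreachable because found ≤ total length, and returns i to stay total)
def pvWalk (tokens : List String) (l i found : Int) : Int :=
  match tokens with
  | [] => i
  | t :: rest => if l < found then pvWalk rest (l + t.toList.length) (i + 1) found else i

def rfind_token_index (tokens : List String) (sub : String) : Int :=
  let combined := pvJoin tokens
  let found_index := pvRfind combined sub.toList
  if found_index < 0 then -1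
  else pvWalk tokens 0 0 found_index

-- ===== PORT B =====
-- prefix = [0]; for t in tokens: prefix.append(prefix[-1] + len(t))
def pvPrefixTable (tokens : List String) (acc : Int) : List Int :=
  match tokens with
  | [] => [acc]
  | t :: rest => acc :: pvPrefixTable rest (acc + t.toList.length)

-- the bisect_left binary-search loop of Source B (prefix[mid] with mid < len(prefix) always)
def pvBisect (xs : List Int) (found : Int) (lo hi : Nat) : Nat :=
  if _h : lo < hi then
    let mid := (lo + hi) / 2
    if xs.getD mid 0 < found then pvBisect xs found (mid + 1) hi
    else pvBisect xs found lo mid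
  else lo
termination_by hi - lo
decreasing_by all_goals omega

def rfind_token_index_alt (tokens : List String) (sub : String) : Int :=
  let combined := pvJoin tokens
  let found_index := pvRfind combined sub.toList
  if found_index < 0 then -1
  else
    let table := pvPrefixTable tokens 0
    (pvBisect table found_index 0 table.length : Int)

-- ===== PRECONDITION & SPEC =====
def Spec_rfind_token_index (tokens : List String) (sub : String) (out : Int) : Prop := out = rfind_token_index_alt tokens sub
instance (tokens : List String) (sub : String) (out : Int) : Decidable (Spec_rfind_token_index tokens sub out) := by unfold Spec_rfind_token_index; infer_instance

-- ===== CLAIM (what is proved, stated in full; the proofs are below) =====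
def Claim_equal_rfind_token_index : Prop := ∀ (tokens : List String) (sub : String), Dom_rfind_token_index tokens sub → Spec_rfind_token_index tokens sub (rfind_token_index tokens sub)

-- ===== LEMMAS AND PROOFS =====

-- total length of the tokens
def pvSumLen (tokens : List String) : Int :=
  match tokens with
  | [] => 0
  | t :: rest => t.toList.length + pvSumLen rest

lemma pvSumLen_eq_join (tokens : List String) :
    pvSumLen tokens = ((pvJoin tokens).length : Int) := by
  induction tokens with
  | nil => simp [pvSumLen, pvJoin]
  | cons t rest ih => simp [pvSumLen, pvJoin, ih]

lemma pvRfindGo_le (c s : List Char) (j : Nat) : pvRfindGo c s j ≤ (j : Int) := by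
  induction j with
  | zero =>
    show (if pvMatchAt c s 0 then (0:Int) else -1) ≤ (0:Int)
    split <;> omega
  | succ j ih =>
    simp only [pvRfindGo]
    split
    · omega
    · push_cast; omega

lemma pvRfind_le (c s : List Char) : pvRfind c s ≤ (c.length : Int) := by
  have h := pvRfindGo_le c s (c.length - s.length)
  have : ((c.length - s.length : Nat) : Int) ≤ (c.length : Int) := by
    exact_mod_cast Nat.sub_le _ _
  unfold pvRfind; omega

-- the target index k = length of the initial segment of the table that is < found
-- (that is exactly where A's walk stops)
lemma pvWalk_eq_takeWhile (tokens : List String) :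
    ∀ (l i found : Int), found ≤ l + pvSumLen tokens →
      pvWalk tokens l i found =
        i + (((pvPrefixTable tokens l).takeWhile (fun p => decide (p < found))).length : Int) := by
  induction tokens with
  | nil =>
    intro l i found h
    simp only [pvSumLen, add_zero] at h
    have hnl : ¬ (l < found) := by omega
    simp [pvWalk, pvPrefixTable, hnl]
  | cons t rest ih =>
    intro l i found h
    simp only [pvWalk, pvPrefixTable, List.takeWhile_cons]
    by_cases hl : l < found
    · rw [if_pos hl]
      have hrec : found ≤ (l + (t.toList.length : Int)) + pvSumLen rest := by
        simp only [pvSumLen] at h; omega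
      rw [ih (l + (t.toList.length : Int)) (i + 1) found hrec]
      simp [hl]
      ring
    · rw [if_neg hl]
      simp [hl]

lemma pvPrefixTable_mem_ge (tokens : List String) :
    ∀ (acc x : Int), x ∈ pvPrefixTable tokens acc → acc ≤ x := by
  induction tokens with
  | nil => intro acc x hx; simp [pvPrefixTable] at hx; omega
  | cons t rest ih =>
    intro acc x hx
    simp [pvPrefixTable] at hx
    rcases hx with h | h
    · omega
    · have := ih (acc + t.toList.length) x h
      have : (0:Int) ≤ t.toList.length := by positivity
      omega

-- characterisation: for the (nondecreasing) table, entry j is < found iff j < k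
lemma pvTable_lt_iff (tokens : List String) :
    ∀ (acc found : Int) (j : Nat), j < (pvPrefixTable tokens acc).length →
      ((pvPrefixTable tokens acc).getD j 0 < found ↔
        j < ((pvPrefixTable tokens acc).takeWhile (fun p => decide (p < found))).length) := by
  induction tokens with
  | nil =>
    intro acc found j hj
    simp [pvPrefixTable] at hj
    subst hj
    simp [pvPrefixTable, List.takeWhile]
    by_cases h : acc < found <;> simp [h]
  | cons t rest ih =>
    intro acc found j hj
    simp only [pvPrefixTable, List.takeWhile_cons]
    have hj' : j = 0 ∨ ∃ j', j = j' + 1 ∧ j' < (pvPrefixTable rest (acc + (t.toList.length : Int))).length := by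
      cases j with
      | zero => exact Or.inl rfl
      | succ j' =>
        refine Or.inr ⟨j', rfl, ?_⟩
        simpa [pvPrefixTable] using hj
    by_cases hacc : acc < found
    · rcases hj' with h0 | ⟨j', rfl, hj'⟩
      · subst h0; simp [hacc]
      · have := ih (acc + (t.toList.length : Int)) found j' hj'
        simp only [hacc, decide_true, if_pos, List.getD_cons_succ, List.length_cons]
        constructor
        · intro h; have := this.mp h; omega
        · intro h; exact this.mpr (by omega)
    · rcases hj' with h0 | ⟨j', rfl, hj'⟩
      · subst h0; simp [hacc]
      · have hmem : (pvPrefixTable rest (acc + (t.toList.length : Int))).getD j' 0 ∈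
            pvPrefixTable rest (acc + (t.toList.length : Int)) := by
          rw [List.getD_eq_getElem _ _ hj']
          exact List.getElem_mem hj'
        have h1 := pvPrefixTable_mem_ge rest (acc + (t.toList.length : Int)) _ hmem
        have h2 : (0:Int) ≤ (t.toList.length : Int) := by positivity
        have hdec : decide (acc < found) = false := by simp [hacc]
        simp only [hdec, Bool.false_eq_true, if_false, List.getD_cons_succ, List.length_nil]
        constructor
        · intro h; omega
        · intro h; omega

-- correctness of the binary search against the characterised target k
lemma pvBisect_eq (xs : List Int) (found : Int) (k : Nat)
    (hk : ∀ j, j < xs.length → (xs.getD j 0 < found ↔ j < k)) :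
    ∀ (n lo hi : Nat), hi - lo ≤ n → lo ≤ k → k ≤ hi → hi ≤ xs.length →
      pvBisect xs found lo hi = k := by
  intro n
  induction n with
  | zero =>
    intro lo hi hn h1 h2 h3
    unfold pvBisect
    rw [dif_neg (by omega)]
    omega
  | succ n ih =>
    intro lo hi hn h1 h2 h3
    unfold pvBisect
    by_cases hlh : lo < hi
    · rw [dif_pos hlh]
      simp only
      set mid := (lo + hi) / 2 with hmid
      have hmlt : mid < hi := by omega
      have hmge : lo ≤ mid := by omega
      by_cases hc : xs.getD mid 0 < found
      · rw [if_pos hc]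
        have : mid < k := (hk mid (by omega)).mp hc
        exact ih (mid + 1) hi (by omega) (by omega) h2 h3
      · rw [if_neg hc]
        have : ¬ mid < k := fun h => hc ((hk mid (by omega)).mpr h)
        exact ih lo mid (by omega) h1 (by omega) (by omega)
    · rw [dif_neg hlh]; omega

lemma pvPrefixTable_length (tokens : List String) (acc : Int) :
    (pvPrefixTable tokens acc).length = tokens.length + 1 := by
  induction tokens generalizing acc with
  | nil => simp [pvPrefixTable]
  | cons t rest ih => simp [pvPrefixTable, ih]

-- k never exceeds the table length (takeWhile is a prefix)
lemma takeWhile_le_length {α : Type} (p : α → Bool) (xs : List α) :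
    (xs.takeWhile p).length ≤ xs.length :=
  (List.takeWhile_sublist p).length_le

theorem pv_main (tokens : List String) (sub : String) :
    rfind_token_index tokens sub = rfind_token_index_alt tokens sub := by
  unfold rfind_token_index rfind_token_index_alt
  simp only
  set c := pvJoin tokens with hc
  set found := pvRfind c sub.toList with hfound
  by_cases hneg : found < 0
  · simp [hneg]
  · simp only [if_neg hneg]
    have hle : found ≤ pvSumLen tokens := by
      have := pvRfind_le c sub.toList
      rw [pvSumLen_eq_join]; omega
    set k := ((pvPrefixTable tokens 0).takeWhile (fun p => decide (p < found))).length with hk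
    have hwalk := pvWalk_eq_takeWhile tokens 0 0 found (by omega)
    rw [hwalk]
    have hlen := pvPrefixTable_length tokens 0
    have hkle : k ≤ (pvPrefixTable tokens 0).length := takeWhile_le_length _ _
    have hbis := pvBisect_eq (pvPrefixTable tokens 0) found k
      (fun j hj => pvTable_lt_iff tokens 0 found j hj)
      (pvPrefixTable tokens 0).length 0 (pvPrefixTable tokens 0).length
      (by omega) (by omega) hkle (by omega)
    rw [hbis]
    omega

-- ===== VERDICT (by name: the statement is the Claim_ definition above) =====
theorem rfind_token_index_spec : Claim_equal_rfind_token_index := by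
  intro tokens sub _
  unfold Spec_rfind_token_index
  exact pv_main tokens sub
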